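-- pv_equiv track=rewrite | github.com/killdead/5-min-btc | btc5m_trading_bot.py | reorder_slugs_from_reference
-- ===== SOURCE A (Python) =====
-- from typing import Any, Dict, List, Optional, Tuple
--
-- def btc5m_slug_ts(slug: str) -> Optional[int]:
--     try:
--         if not slug.startswith("btc-updown-5m-"):
--             return None
--         return int(slug.rsplit("-", 1)[1])
--     except Exception:
--         return None
--
-- def reorder_slugs_from_reference(slugs: List[str], reference_ts: Optional[int]) -> List[str]:
--     if not slugs:
--         return slugs
--     pairs = [(s, btc5m_slug_ts(s)) for s in slugs]
--     # keep unknowns last deterministically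
--     known = [(s, ts) for s, ts in pairs if ts is not None]
--     unknown = [s for s, ts in pairs if ts is None]
--     known.sort(key=lambda x: x[1])
--     if reference_ts is None:
--         return [s for s, _ in known] + unknown
--     newer = [s for s, ts in known if ts >= reference_ts]
--     older = [s for s, ts in known if ts < reference_ts]
--     return newer + older + unknown
-- ===== SOURCE B (Python) =====
-- from typing import List, Optional
--
-- def btc5m_slug_ts(slug: str) -> Optional[int]:
--     try:
--         if not slug.startswith("btc-updown-5m-"):
--             return None
--         return int(slug.rsplit("-", 1)[1])
--     except Exception:
--         return None
--
-- def reorder_slugs_from_reference(slugs: List[str], reference_ts: Optional[int]) -> List[str]: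
--     if not slugs:
--         return slugs
--     # One stable sort of the whole list with a composite key: group 0 = known and
--     # not older than the reference, group 1 = known and older, group 2 = unknown
--     # (ties keep input order, so unknowns stay in input order at the end).
--     def key(s: str):
--         ts = btc5m_slug_ts(s)
--         if ts is None:
--             return (2, 0)
--         if reference_ts is not None and ts < reference_ts:
--             return (1, ts)
--         return (0, ts)
--     return sorted(slugs, key=key)
-- ===== Notes on version B (the rewrite author's own statement) =====
-- stated objective: idiomatic
-- what changed: B replaces A's pipeline (pairs list, known/unknown filter passes, sort, then two more newer/older filter passes over the sorted list) by a single stable sorted() call over the slugs with a composite (group, timestamp) key, where group 0 = known and not older than the reference, 1 = known and older, 2 = unknown.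
import Mathlib
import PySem

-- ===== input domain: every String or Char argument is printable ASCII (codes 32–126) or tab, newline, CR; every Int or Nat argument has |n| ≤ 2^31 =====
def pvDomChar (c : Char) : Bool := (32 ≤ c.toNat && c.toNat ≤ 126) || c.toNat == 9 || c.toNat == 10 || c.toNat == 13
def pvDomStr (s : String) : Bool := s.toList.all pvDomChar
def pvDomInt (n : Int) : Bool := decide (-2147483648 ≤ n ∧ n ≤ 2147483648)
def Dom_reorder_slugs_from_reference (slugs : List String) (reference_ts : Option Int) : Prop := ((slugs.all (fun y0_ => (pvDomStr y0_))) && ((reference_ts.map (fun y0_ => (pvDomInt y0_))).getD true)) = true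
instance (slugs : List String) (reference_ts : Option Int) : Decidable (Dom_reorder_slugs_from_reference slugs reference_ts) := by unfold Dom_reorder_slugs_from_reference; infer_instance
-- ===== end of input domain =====

-- B replaces A's partition-sort-repartition (pairs list, three filter passes, sort, two more
-- filter passes over the sorted list) by ONE stable sort of the slugs with a composite
-- (group, timestamp) key (idiomatic single-sort decomposition, same value).

-- ===== PORT A =====
def btc5m_slug_ts (slug : String) : Option Int :=
  if !(PySem.Str.startswith slug "btc-updown-5m-") then none
  else
    -- slug.rsplit("-", 1)[1] = the characters after the LAST '-' (one exists: the prefix check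
    -- passed, so '-' occurs); exact on this branch. int(...) -> PySem.Int.ofChars? (none = ValueError,
    -- which the try/except turns into None).
    PySem.Int.ofChars? ((slug.toList.reverse.takeWhile (fun c => c ≠ '-')).reverse)

def reorder_slugs_from_reference (slugs : List String) (reference_ts : Option Int) : List String :=
  if slugs = [] then slugs
  else
    let pairs := slugs.map (fun s => (s, btc5m_slug_ts s))
    let known := pairs.filterMap (fun p => p.2.map (fun t => (p.1, t)))
    let unknown := (pairs.filter (fun p => p.2 = none)).map (fun p => p.1)
    let known := PySem.List.sorted known (fun p => p.2) false
    match reference_ts with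
    | none => known.map (fun p => p.1) ++ unknown
    | some r =>
      let newer := (known.filter (fun p => decide (r ≤ p.2))).map (fun p => p.1)
      let older := (known.filter (fun p => decide (p.2 < r))).map (fun p => p.1)
      newer ++ older ++ unknown

-- ===== PORT B =====
-- the composite key of Source B, split into its two components as sorted2 takes them
def pvK1 (reference_ts : Option Int) (s : String) : Int :=
  match btc5m_slug_ts s with
  | none => 2
  | some t =>
    match reference_ts with
    | none => 0
    | some r => if t < r then 1 else 0

def pvK2 (s : String) : Int :=
  match btc5m_slug_ts s with
  | none => 0
  | some t => t

def reorder_slugs_from_reference_alt (slugs : List String) (reference_ts : Option Int) : List String :=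
  if slugs = [] then slugs
  else PySem.List.sorted2 slugs (pvK1 reference_ts) pvK2 false

-- ===== PRECONDITION & SPEC =====
def Spec_reorder_slugs_from_reference (slugs : List String) (reference_ts : Option Int) (out : List String) : Prop := out = reorder_slugs_from_reference_alt slugs reference_ts
instance (slugs : List String) (reference_ts : Option Int) (out : List String) : Decidable (Spec_reorder_slugs_from_reference slugs reference_ts out) := by unfold Spec_reorder_slugs_from_reference; infer_instance

-- ===== CLAIM (what is proved, stated in full; the proofs are below) =====
def Claim_equal_reorder_slugs_from_reference : Prop := ∀ (slugs : List String) (reference_ts : Option Int), Dom_reorder_slugs_from_reference slugs reference_ts → Spec_reorder_slugs_from_reference slugs reference_ts (reorder_slugs_from_reference slugs reference_ts)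

-- ===== LEMMAS AND PROOFS =====

-- pairing a known slug with its timestamp
def pvG (s : String) : String × Int := (s, pvK2 s)

-- --- generic facts about insertion (stable) sorting via insertBy folds ---

theorem pv_ins_append_left {α : Type} (before : α → α → Bool) (x : α) (ys zs : List α)
    (h : ∀ z ∈ zs, before x z = true) :
    PySem.List.insertBy before x (ys ++ zs) = PySem.List.insertBy before x ys ++ zs := by
  induction ys with
  | nil =>
    cases zs with
    | nil => rfl
    | cons z t => simp [PySem.List.insertBy, h z (by simp)]
  | cons y t ih =>
    by_cases hxy : before x y = true
    · simp [PySem.List.insertBy, hxy]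
    · simp [PySem.List.insertBy, hxy, ih]

theorem pv_ins_append_right {α : Type} (before : α → α → Bool) (x : α) (ys zs : List α)
    (h : ∀ y ∈ ys, before x y = false) :
    PySem.List.insertBy before x (ys ++ zs) = ys ++ PySem.List.insertBy before x zs := by
  induction ys with
  | nil => rfl
  | cons y t ih =>
    have hy : before x y = false := h y (by simp)
    simp only [List.cons_append, PySem.List.insertBy, hy]
    simp only [Bool.false_eq_true, if_false, List.cons.injEq, true_and]
    exact ih (fun y hy => h y (by simp [hy]))

theorem pv_ins_congr {α : Type} (before before' : α → α → Bool) (x : α) (ys : List α)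
    (h : ∀ y ∈ ys, before x y = before' x y) :
    PySem.List.insertBy before x ys = PySem.List.insertBy before' x ys := by
  induction ys with
  | nil => rfl
  | cons y t ih =>
    have hy := h y (by simp)
    by_cases hxy : before x y = true
    · simp [PySem.List.insertBy, hxy, hy ▸ hxy]
    · have hxy' : before' x y = true → False := fun hc => hxy (hy ▸ hc)
      simp only [PySem.List.insertBy, hxy, if_false, eq_false hxy', if_false]
      simp [ih (fun y hy => h y (by simp [hy]))]

theorem pv_foldl_ins_congr {α : Type} (before before' : α → α → Bool) :
    ∀ (xs acc : List α), (∀ a ∈ xs, ∀ b ∈ acc, before a b = before' a b) →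
      (∀ a ∈ xs, ∀ b ∈ xs, before a b = before' a b) →
      xs.foldl (fun acc x => PySem.List.insertBy before x acc) acc
        = xs.foldl (fun acc x => PySem.List.insertBy before' x acc) acc := by
  intro xs
  induction xs with
  | nil => intro acc _ _; rfl
  | cons x t ih =>
    intro acc hacc hxs
    have hstep : PySem.List.insertBy before x acc = PySem.List.insertBy before' x acc :=
      pv_ins_congr _ _ _ _ (fun b hb => hacc x (by simp) b hb)
    simp only [List.foldl_cons, hstep]
    apply ih
    · intro a ha b hb
      rcases (PySem.List.mem_insertBy _ _ _ _).mp hb with rfl | hb'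
      · exact hxs a (by simp [ha]) b (by simp)
      · exact hacc a (by simp [ha]) b hb'
    · intro a ha b hb
      exact hxs a (by simp [ha]) b (by simp [hb])

theorem pv_ins_map {α β : Type} (g : α → β) (before : α → α → Bool) (before' : β → β → Bool)
    (x : α) (ys : List α) (h : ∀ a b, before' (g a) (g b) = before a b) :
    PySem.List.insertBy before' (g x) (ys.map g) = (PySem.List.insertBy before x ys).map g := by
  induction ys with
  | nil => rfl
  | cons y t ih =>
    by_cases hxy : before x y = true
    · simp [PySem.List.insertBy, h, hxy]
    · simp [PySem.List.insertBy, h, hxy, ih]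

theorem pv_foldl_ins_map {α β : Type} (g : α → β) (before : α → α → Bool) (before' : β → β → Bool)
    (h : ∀ a b, before' (g a) (g b) = before a b) :
    ∀ (xs acc : List α),
      (xs.map g).foldl (fun acc x => PySem.List.insertBy before' x acc) (acc.map g)
        = (xs.foldl (fun acc x => PySem.List.insertBy before x acc) acc).map g := by
  intro xs
  induction xs with
  | nil => intro acc; rfl
  | cons x t ih =>
    intro acc
    simp only [List.map_cons, List.foldl_cons, pv_ins_map g before before' x acc h]
    exact ih _

theorem pv_foldl_ins_id {α : Type} (before : α → α → Bool) :
    ∀ (xs acc : List α), (∀ a ∈ xs, ∀ b, before a b = false) →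
      xs.foldl (fun acc x => PySem.List.insertBy before x acc) acc = acc ++ xs := by
  intro xs
  induction xs with
  | nil => intro acc _; simp
  | cons x t ih =>
    intro acc h
    simp only [List.foldl_cons]
    rw [PySem.List.insertBy_of_forall_not_before _ _ _ (fun y _ => h x (by simp) y)]
    rw [ih _ (fun a ha b => h a (by simp [ha]) b)]
    simp

-- the workhorse: a stable insertion-sort fold splits into the (at most three) key classes
theorem pv_split3 {α : Type} (before : α → α → Bool) (cls : α → Nat)
    (hlt : ∀ a b, cls b < cls a → before a b = false)
    (hgt : ∀ a b, cls a < cls b → before a b = true)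
    (hle : ∀ a, cls a ≤ 2) :
    ∀ (xs A0 A1 A2 : List α),
      (∀ a ∈ A0, cls a = 0) → (∀ a ∈ A1, cls a = 1) → (∀ a ∈ A2, cls a = 2) →
      xs.foldl (fun acc x => PySem.List.insertBy before x acc) (A0 ++ A1 ++ A2)
        = (xs.filter (fun x => cls x == 0)).foldl (fun acc x => PySem.List.insertBy before x acc) A0
          ++ (xs.filter (fun x => cls x == 1)).foldl (fun acc x => PySem.List.insertBy before x acc) A1
          ++ (xs.filter (fun x => cls x == 2)).foldl (fun acc x => PySem.List.insertBy before x acc) A2 := by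
  intro xs
  induction xs with
  | nil => intro A0 A1 A2 _ _ _; simp
  | cons x t ih =>
    intro A0 A1 A2 h0 h1 h2
    have hx := hle x
    interval_cases hcx : cls x
    · -- class 0: x is inserted inside A0
      have hstep : PySem.List.insertBy before x (A0 ++ A1 ++ A2)
          = PySem.List.insertBy before x A0 ++ (A1 ++ A2) := by
        rw [List.append_assoc]
        exact pv_ins_append_left before x A0 (A1 ++ A2) (by
          intro z hz
          rcases List.mem_append.mp hz with hz | hz
          · exact hgt x z (by rw [hcx, h1 z hz]; omega)
          · exact hgt x z (by rw [hcx, h2 z hz]; omega))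
      simp only [List.foldl_cons, hstep, List.filter_cons, hcx]
      simp only [← List.append_assoc]
      rw [ih (PySem.List.insertBy before x A0) A1 A2 (by
            intro a ha
            rcases (PySem.List.mem_insertBy _ _ _ _).mp ha with rfl | ha'
            · exact hcx
            · exact h0 a ha') h1 h2]
      simp
    · -- class 1: x passes A0 and is inserted inside A1
      have hstep : PySem.List.insertBy before x (A0 ++ A1 ++ A2)
          = A0 ++ (PySem.List.insertBy before x A1 ++ A2) := by
        rw [List.append_assoc]
        rw [pv_ins_append_right before x A0 (A1 ++ A2) (by
          intro y hy; exact hlt x y (by rw [hcx, h0 y hy]; omega))]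
        rw [pv_ins_append_left before x A1 A2 (by
          intro z hz; exact hgt x z (by rw [hcx, h2 z hz]; omega))]
      simp only [List.foldl_cons, hstep, List.filter_cons, hcx]
      simp only [← List.append_assoc]
      rw [ih A0 (PySem.List.insertBy before x A1) A2 h0 (by
            intro a ha
            rcases (PySem.List.mem_insertBy _ _ _ _).mp ha with rfl | ha'
            · exact hcx
            · exact h1 a ha') h2]
      simp
    · -- class 2: x passes A0 ++ A1 and is inserted inside A2
      have hstep : PySem.List.insertBy before x (A0 ++ A1 ++ A2)
          = A0 ++ A1 ++ PySem.List.insertBy before x A2 := by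
        rw [pv_ins_append_right before x (A0 ++ A1) A2 (by
          intro y hy
          rcases List.mem_append.mp hy with hy | hy
          · exact hlt x y (by rw [hcx, h0 y hy]; omega)
          · exact hlt x y (by rw [hcx, h1 y hy]; omega))]
      simp only [List.foldl_cons, hstep, List.filter_cons, hcx]
      rw [ih A0 A1 (PySem.List.insertBy before x A2) h0 h1 (by
            intro a ha
            rcases (PySem.List.mem_insertBy _ _ _ _).mp ha with rfl | ha'
            · exact hcx
            · exact h2 a ha')]
      simp

-- --- facts specific to the two programs ---

-- the unfolded comparison of sorted2 with Source B's composite key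
def pvBB (r : Option Int) (a b : String) : Bool :=
  decide (pvK1 r a < pvK1 r b) || (!decide (pvK1 r b < pvK1 r a) && decide (pvK2 a < pvK2 b))

theorem pv_k1_cases (r : Option Int) (s : String) :
    pvK1 r s = 0 ∨ pvK1 r s = 1 ∨ pvK1 r s = 2 := by
  unfold pvK1
  cases btc5m_slug_ts s with
  | none => simp
  | some t => cases r with
    | none => simp
    | some rv => by_cases h : t < rv <;> simp [h]

def pvCls (r : Option Int) (s : String) : Nat := (pvK1 r s).toNat

theorem pv_known_eq_map (slugs : List String) :
    slugs.filterMap (fun s => (btc5m_slug_ts s).map (fun t => (s, t)))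
      = (slugs.filter (fun s => (btc5m_slug_ts s).isSome)).map pvG := by
  induction slugs with
  | nil => rfl
  | cons s t ih =>
    cases h : btc5m_slug_ts s with
    | none => simp [List.filterMap_cons, h, List.filter_cons, ih]
    | some v => simp [List.filterMap_cons, h, List.filter_cons, ih, pvG, pvK2]

theorem pv_sorted_map (l : List String) :
    PySem.List.sorted (l.map pvG) (fun p => p.2) false
      = (PySem.List.sorted l pvK2 false).map pvG := by
  rw [PySem.List.sorted_eq_foldl_insertBy, PySem.List.sorted_eq_foldl_insertBy]
  have := pv_foldl_ins_map pvG (fun a b => decide (pvK2 a < pvK2 b))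
      (fun p q => decide (p.2 < q.2)) (by intro a b; simp [pvG]) l []
  simpa using this

theorem pv_sorted2_eq_foldl (slugs : List String) (r : Option Int) :
    PySem.List.sorted2 slugs (pvK1 r) pvK2 false
      = slugs.foldl (fun acc x => PySem.List.insertBy (pvBB r) x acc) [] := by
  rfl

-- --- pointwise facts about the composite key ---

theorem pv_cls_le (r : Option Int) (s : String) : pvCls r s ≤ 2 := by
  rcases pv_k1_cases r s with h | h | h <;> simp [pvCls, h]

theorem pv_k1_two (r : Option Int) (s : String) (h : pvK1 r s = 2) :
    btc5m_slug_ts s = none := by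
  unfold pvK1 at h
  cases hts : btc5m_slug_ts s with
  | none => rfl
  | some t =>
    rw [hts] at h
    cases r with
    | none => simp at h
    | some rv => by_cases hlt : t < rv <;> simp [hlt] at h

theorem pv_bb_lt (r : Option Int) (a b : String) (h : pvCls r b < pvCls r a) :
    pvBB r a b = false := by
  rcases pv_k1_cases r a with ha | ha | ha <;> rcases pv_k1_cases r b with hb | hb | hb <;>
    simp [pvCls, ha, hb] at h ⊢ <;> simp [pvBB, ha, hb]

theorem pv_bb_gt (r : Option Int) (a b : String) (h : pvCls r a < pvCls r b) :
    pvBB r a b = true := by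
  rcases pv_k1_cases r a with ha | ha | ha <;> rcases pv_k1_cases r b with hb | hb | hb <;>
    simp [pvCls, ha, hb] at h ⊢ <;> simp [pvBB, ha, hb]

theorem pv_bb_two (r : Option Int) (a : String) (h : pvK1 r a = 2) (b : String) :
    pvBB r a b = false := by
  have hk2a : pvK2 a = 0 := by simp [pvK2, pv_k1_two r a h]
  rcases pv_k1_cases r b with hb | hb | hb <;>
    simp [pvBB, h, hb, hk2a]
  · have hk2b : pvK2 b = 0 := by simp [pvK2, pv_k1_two r b hb]
    simp [hk2b]

theorem pv_bb_eq_b2 (r : Option Int) (c : Int) (a b : String)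
    (ha : pvK1 r a = c) (hb : pvK1 r b = c) :
    pvBB r a b = decide (pvK2 a < pvK2 b) := by
  simp [pvBB, ha, hb]

theorem pv_cls0_some (rv : Int) (s : String) :
    (pvCls (some rv) s == 0) = ((btc5m_slug_ts s).isSome && !decide (pvK2 s < rv)) := by
  unfold pvCls pvK1 pvK2
  cases hts : btc5m_slug_ts s with
  | none => simp
  | some t => by_cases h : t < rv <;> simp [h]

theorem pv_cls1_some (rv : Int) (s : String) :
    (pvCls (some rv) s == 1) = ((btc5m_slug_ts s).isSome && decide (pvK2 s < rv)) := by
  unfold pvCls pvK1 pvK2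
  cases hts : btc5m_slug_ts s with
  | none => simp
  | some t => by_cases h : t < rv <;> simp [h]

theorem pv_cls0_none (s : String) : (pvCls none s == 0) = (btc5m_slug_ts s).isSome := by
  unfold pvCls pvK1
  cases hts : btc5m_slug_ts s <;> simp

theorem pv_cls1_none (s : String) : (pvCls none s == 1) = false := by
  unfold pvCls pvK1
  cases hts : btc5m_slug_ts s <;> simp

theorem pv_cls2 (r : Option Int) (s : String) :
    (pvCls r s == 2) = decide (btc5m_slug_ts s = none) := by
  unfold pvCls pvK1
  cases hts : btc5m_slug_ts s with
  | none => simp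
  | some t => cases r with
    | none => simp
    | some rv => by_cases h : t < rv <;> simp [h]

-- fold with the composite comparison over a single-class list = plain stable sort by pvK2
theorem pv_fold_class (r : Option Int) (c : Int) (l : List String)
    (h : ∀ a ∈ l, pvK1 r a = c) :
    l.foldl (fun acc x => PySem.List.insertBy (pvBB r) x acc) []
      = PySem.List.sorted l pvK2 false := by
  rw [PySem.List.sorted_eq_foldl_insertBy]
  exact pv_foldl_ins_congr _ _ l [] (by simp)
    (fun a ha b hb => pv_bb_eq_b2 r c a b (h a ha) (h b hb))

-- fold over the unknown class is the identity (all comparisons false)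
theorem pv_fold_unknown (r : Option Int) (l : List String)
    (h : ∀ a ∈ l, pvK1 r a = 2) :
    l.foldl (fun acc x => PySem.List.insertBy (pvBB r) x acc) [] = l := by
  have := pv_foldl_ins_id (pvBB r) l [] (fun a ha b => pv_bb_two r a (h a ha) b)
  simpa using this

-- filters of A (over pairs) pushed through the pairing map
theorem pv_filter_le_map_pvG (rv : Int) (l : List String) :
    (l.map pvG).filter (fun p => decide (rv ≤ p.2))
      = (l.filter (fun s => decide (rv ≤ pvK2 s))).map pvG := by
  induction l with
  | nil => rfl
  | cons s t ih =>
    by_cases h : rv ≤ pvK2 s <;> simp [pvG, List.filter_cons, h, ih]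

theorem pv_filter_lt_map_pvG (rv : Int) (l : List String) :
    (l.map pvG).filter (fun p => decide (p.2 < rv))
      = (l.filter (fun s => decide (pvK2 s < rv))).map pvG := by
  induction l with
  | nil => rfl
  | cons s t ih =>
    by_cases h : pvK2 s < rv <;> simp [pvG, List.filter_cons, h, ih]

-- ===== VERDICT (by name: the statement is the Claim_ definition above) =====
theorem reorder_slugs_from_reference_spec : Claim_equal_reorder_slugs_from_reference := by
  intro slugs r _
  unfold Spec_reorder_slugs_from_reference reorder_slugs_from_reference reorder_slugs_from_reference_alt
  by_cases hnil : slugs = []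
  · simp [hnil]
  · simp only [hnil, if_false]
    rw [pv_sorted2_eq_foldl]
    have hsplit := pv_split3 (pvBB r) (pvCls r) (pv_bb_lt r) (pv_bb_gt r) (pv_cls_le r)
      slugs [] [] [] (by simp) (by simp) (by simp)
    simp only [List.append_nil] at hsplit
    rw [hsplit]
    have hkn : (slugs.map (fun s => (s, btc5m_slug_ts s))).filterMap
        (fun p => p.2.map (fun t => (p.1, t)))
        = (slugs.filter (fun s => (btc5m_slug_ts s).isSome)).map pvG := by
      rw [List.filterMap_map]
      rw [show ((fun p : String × Option Int => p.2.map (fun t => (p.1, t))) ∘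
            (fun s => (s, btc5m_slug_ts s)))
          = (fun s => (btc5m_slug_ts s).map (fun t => (s, t))) from rfl]
      exact pv_known_eq_map slugs
    have hun : ((slugs.map (fun s => (s, btc5m_slug_ts s))).filter
        (fun p => p.2 = none)).map (fun p => p.1)
        = slugs.filter (fun s => btc5m_slug_ts s = none) := by
      rw [List.filter_map, List.map_map]
      simp [Function.comp_def]
    have hF2 : (slugs.filter (fun x => pvCls r x == 2)).foldl
        (fun acc x => PySem.List.insertBy (pvBB r) x acc) []
        = slugs.filter (fun s => btc5m_slug_ts s = none) := by
      rw [pv_fold_unknown r _ (by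
        intro a ha
        have := (List.mem_filter.mp ha).2
        rw [pv_cls2] at this
        simp only [decide_eq_true_eq] at this
        unfold pvK1; rw [this])]
      exact List.filter_congr (fun s _ => pv_cls2 r s)
    rw [hF2]
    cases r with
    | none =>
      have h1 : slugs.filter (fun x => pvCls none x == 1) = [] := by
        rw [List.filter_eq_nil_iff]; intro a _; rw [pv_cls1_none]; simp
      have h0 : slugs.filter (fun x => pvCls none x == 0)
          = slugs.filter (fun s => (btc5m_slug_ts s).isSome) := by
        exact List.filter_congr (fun s _ => pv_cls0_none s)
      rw [h0, h1]
      rw [pv_fold_class none 0 _ (by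
        intro a ha
        have := (List.mem_filter.mp ha).2
        unfold pvK1
        cases hts : btc5m_slug_ts a with
        | none => rw [hts] at this; simp at this
        | some t => rfl)]
      rw [hkn, pv_sorted_map, List.map_map, hun]
      simp [Function.comp_def, pvG]
    | some rv =>
      rw [hkn, pv_sorted_map]
      have hsplit2 := pv_split3 (fun a b => decide (pvK2 a < pvK2 b))
        (fun s => if pvK2 s < rv then 0 else 1)
        (by intro a b h; dsimp only at h ⊢
            by_cases h1 : pvK2 a < rv <;> by_cases h2 : pvK2 b < rv <;>
              simp [h1, h2] at h ⊢ <;> omega)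
        (by intro a b h; dsimp only at h ⊢
            by_cases h1 : pvK2 a < rv <;> by_cases h2 : pvK2 b < rv <;>
              simp [h1, h2] at h ⊢ <;> omega)
        (by intro a; dsimp only; split_ifs <;> omega)
        (slugs.filter (fun s => (btc5m_slug_ts s).isSome)) [] [] [] (by simp) (by simp) (by simp)
      simp only [List.append_nil] at hsplit2
      rw [PySem.List.sorted_eq_foldl_insertBy, hsplit2]
      -- reduce the three class folds of both sides to sorted filtered lists
      have hP2 : ((slugs.filter (fun s => (btc5m_slug_ts s).isSome)).filter
          (fun x => (if pvK2 x < rv then 0 else 1) == 2)) = [] := by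
        rw [List.filter_eq_nil_iff]; intro a _; by_cases h : pvK2 a < rv <;> simp [h]
      have hP0 : ((slugs.filter (fun s => (btc5m_slug_ts s).isSome)).filter
          (fun x => (if pvK2 x < rv then 0 else 1) == 0))
          = slugs.filter (fun s => (btc5m_slug_ts s).isSome && decide (pvK2 s < rv)) := by
        rw [List.filter_filter]
        exact List.filter_congr (fun a _ => by by_cases h : pvK2 a < rv <;> simp [h])
      have hP1 : ((slugs.filter (fun s => (btc5m_slug_ts s).isSome)).filter
          (fun x => (if pvK2 x < rv then 0 else 1) == 1))
          = slugs.filter (fun s => (btc5m_slug_ts s).isSome && !decide (pvK2 s < rv)) := by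
        rw [List.filter_filter]
        exact List.filter_congr (fun a _ => by by_cases h : pvK2 a < rv <;> simp [h])
      rw [hP0, hP1, hP2]
      rw [← PySem.List.sorted_eq_foldl_insertBy
        (slugs.filter (fun s => (btc5m_slug_ts s).isSome && decide (pvK2 s < rv))) pvK2]
      rw [← PySem.List.sorted_eq_foldl_insertBy
        (slugs.filter (fun s => (btc5m_slug_ts s).isSome && !decide (pvK2 s < rv))) pvK2]
      -- B's two known class folds
      have hB0 : (slugs.filter (fun x => pvCls (some rv) x == 0)).foldl
          (fun acc x => PySem.List.insertBy (pvBB (some rv)) x acc) []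
          = PySem.List.sorted
              (slugs.filter (fun s => (btc5m_slug_ts s).isSome && !decide (pvK2 s < rv))) pvK2 false := by
        rw [pv_fold_class (some rv) 0 _ (by
          intro a ha
          have h := (List.mem_filter.mp ha).2
          rcases pv_k1_cases (some rv) a with hk | hk | hk
          · exact hk
          · simp [pvCls, hk] at h
          · simp [pvCls, hk] at h)]
        congr 1
        exact List.filter_congr (fun s _ => pv_cls0_some rv s)
      have hB1 : (slugs.filter (fun x => pvCls (some rv) x == 1)).foldl
          (fun acc x => PySem.List.insertBy (pvBB (some rv)) x acc) []
          = PySem.List.sorted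
              (slugs.filter (fun s => (btc5m_slug_ts s).isSome && decide (pvK2 s < rv))) pvK2 false := by
        rw [pv_fold_class (some rv) 1 _ (by
          intro a ha
          have h := (List.mem_filter.mp ha).2
          rcases pv_k1_cases (some rv) a with hk | hk | hk
          · simp [pvCls, hk] at h
          · exact hk
          · simp [pvCls, hk] at h)]
        congr 1
        exact List.filter_congr (fun s _ => pv_cls1_some rv s)
      rw [hB0, hB1]
      -- distribute A's two filters over the sorted pieces and drop the pairing map
      simp only [List.foldl_nil, List.append_nil, List.map_append, List.filter_append]
      rw [pv_filter_le_map_pvG, pv_filter_le_map_pvG, pv_filter_lt_map_pvG, pv_filter_lt_map_pvG]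
      have f1 : (PySem.List.sorted
          (slugs.filter (fun s => (btc5m_slug_ts s).isSome && decide (pvK2 s < rv))) pvK2 false).filter
          (fun s => decide (rv ≤ pvK2 s)) = [] := by
        rw [List.filter_eq_nil_iff]
        intro a ha
        have := (List.mem_filter.mp ((PySem.List.mem_sorted _ _ _ _).mp ha)).2
        simp at this ⊢
        omega
      have f4 : (PySem.List.sorted
          (slugs.filter (fun s => (btc5m_slug_ts s).isSome && !decide (pvK2 s < rv))) pvK2 false).filter
          (fun s => decide (pvK2 s < rv)) = [] := by
        rw [List.filter_eq_nil_iff]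
        intro a ha
        have := (List.mem_filter.mp ((PySem.List.mem_sorted _ _ _ _).mp ha)).2
        simp at this ⊢
        omega
      have f2 : (PySem.List.sorted
          (slugs.filter (fun s => (btc5m_slug_ts s).isSome && !decide (pvK2 s < rv))) pvK2 false).filter
          (fun s => decide (rv ≤ pvK2 s))
          = PySem.List.sorted
              (slugs.filter (fun s => (btc5m_slug_ts s).isSome && !decide (pvK2 s < rv))) pvK2 false := by
        rw [List.filter_eq_self]
        intro a ha
        have := (List.mem_filter.mp ((PySem.List.mem_sorted _ _ _ _).mp ha)).2
        simp at this ⊢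
        omega
      have f3 : (PySem.List.sorted
          (slugs.filter (fun s => (btc5m_slug_ts s).isSome && decide (pvK2 s < rv))) pvK2 false).filter
          (fun s => decide (pvK2 s < rv))
          = PySem.List.sorted
              (slugs.filter (fun s => (btc5m_slug_ts s).isSome && decide (pvK2 s < rv))) pvK2 false := by
        rw [List.filter_eq_self]
        intro a ha
        have := (List.mem_filter.mp ((PySem.List.mem_sorted _ _ _ _).mp ha)).2
        simp at this ⊢
        omega
      rw [f1, f2, f3, f4]
      rw [hun]
      simp [Function.comp_def, pvG]
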